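-- pv_equiv track=rewrite | github.com/JpCurada/g6-mp2-desalgo | src/algorithms/optimized/optimized_linear_search.py | fnSentinelLinearSearch
-- ===== SOURCE A (Python) =====
-- def fnSentinelLinearSearch(arrInput: list, varTarget: any) -> int:
--     """
--     Description:
--         Performs an optimized sequential search using the sentinel technique.
--         Temporarily places the target at the end of the array to eliminate
--         the need for bounds checking in each iteration.
--
--     Parameters:
--         arrInput (list): The array to search in, can contain any comparable type
--         varTarget (any): The target element to search for
--
--     Returns:
--         int: Index of the first occurrence of varTarget if found, -1 otherwise
--
--     References:
--         https://www.geeksforgeeks.org/sentinel-linear-search/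
--     """
--     intSize: int = len(arrInput)
--     if intSize == 0:
--         return -1
--
--     # Store the last element and place target at the end
--     varLastElement: any = arrInput[intSize - 1]
--     arrInput[intSize - 1] = varTarget
--
--     # Search without bounds checking
--     intIndex: int = 0
--     while arrInput[intIndex] != varTarget:
--         intIndex += 1
--
--     # Restore the last element
--     arrInput[intSize - 1] = varLastElement
--
--     # Check if element was found
--     if intIndex < intSize - 1 or varLastElement == varTarget:
--         return intIndex
--     return -1
-- ===== SOURCE B (Python) =====
-- def fnSentinelLinearSearch(arrInput: list, varTarget: any) -> int:
--     for intIndex, varElement in enumerate(arrInput):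
--         if varElement == varTarget:
--             return intIndex
--     return -1
-- ===== Notes on version B (the rewrite author's own statement) =====
-- stated objective: idiomatic
-- what changed: Replaced the sentinel technique (temporarily overwriting the last element, unbounded while loop, restore, post-hoc membership check) by a plain non-mutating bounds-checked enumerate scan with early return.
import Mathlib
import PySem

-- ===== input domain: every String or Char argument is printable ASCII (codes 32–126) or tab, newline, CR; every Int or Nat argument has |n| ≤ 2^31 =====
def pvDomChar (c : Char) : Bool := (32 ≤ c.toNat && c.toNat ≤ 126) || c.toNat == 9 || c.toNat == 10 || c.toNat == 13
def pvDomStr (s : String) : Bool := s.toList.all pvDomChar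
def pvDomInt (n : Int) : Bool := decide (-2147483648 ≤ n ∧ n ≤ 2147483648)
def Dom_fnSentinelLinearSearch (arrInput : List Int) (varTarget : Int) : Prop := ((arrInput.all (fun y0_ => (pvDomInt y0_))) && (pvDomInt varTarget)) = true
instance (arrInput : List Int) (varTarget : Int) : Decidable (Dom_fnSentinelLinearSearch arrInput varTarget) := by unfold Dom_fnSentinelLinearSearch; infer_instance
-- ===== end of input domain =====

-- B replaces A's sentinel search (transient mutation of the last slot, restored before return;
-- B performs no mutation) by a plain bounds-checked scan with early return; return values agree.

-- ===== PORT A =====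
-- A's while loop scans the mutated array (last slot := varTarget); the sentinel guarantees a hit,
-- so the structural recursion's [] case is unreachable (Python would raise IndexError there).
def pvSentinelLoop (arr : List Int) (t : Int) (i : Int) : Int :=
  match arr with
  | [] => i
  | x :: xs => if x ≠ t then pvSentinelLoop xs t (i + 1) else i

def fnSentinelLinearSearch (arrInput : List Int) (varTarget : Int) : Int :=
  let intSize : Int := arrInput.length
  if intSize = 0 then -1
  else
    -- arrInput[intSize-1]: index is in range (list nonempty), so getD's default is never used
    let varLastElement : Int := arrInput.getD (arrInput.length - 1) 0
    let arrMutated := arrInput.set (arrInput.length - 1) varTarget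
    let intIndex := pvSentinelLoop arrMutated varTarget 0
    -- (the last element is restored in Python; the return value does not depend on it)
    if intIndex < intSize - 1 ∨ varLastElement = varTarget then intIndex else -1

-- ===== PORT B =====
def pvScan (arr : List Int) (t : Int) (i : Int) : Int :=
  match arr with
  | [] => -1
  | x :: xs => if x = t then i else pvScan xs t (i + 1)

def fnSentinelLinearSearch_alt (arrInput : List Int) (varTarget : Int) : Int :=
  pvScan arrInput varTarget 0

-- ===== PRECONDITION & SPEC =====
def Spec_fnSentinelLinearSearch (arrInput : List Int) (varTarget : Int) (out : Int) : Prop := out = fnSentinelLinearSearch_alt arrInput varTarget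
instance (arrInput : List Int) (varTarget : Int) (out : Int) : Decidable (Spec_fnSentinelLinearSearch arrInput varTarget out) := by unfold Spec_fnSentinelLinearSearch; infer_instance

-- ===== CLAIM (what is proved, stated in full; the proofs are below) =====
def Claim_equal_fnSentinelLinearSearch : Prop := ∀ (arrInput : List Int) (varTarget : Int), Dom_fnSentinelLinearSearch arrInput varTarget → Spec_fnSentinelLinearSearch arrInput varTarget (fnSentinelLinearSearch arrInput varTarget)

-- ===== LEMMAS AND PROOFS =====

-- on a list ending in the sentinel, A's loop returns i + (length of the ≠-prefix of ys)
theorem pvSentinelLoop_concat (ys : List Int) (t : Int) (i : Int) :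
    pvSentinelLoop (ys ++ [t]) t i = i + ((ys.takeWhile (fun x => x ≠ t)).length : Int) := by
  induction ys generalizing i with
  | nil => simp [pvSentinelLoop]
  | cons x xs ih =>
    by_cases h : x = t
    · simp [pvSentinelLoop, h, List.takeWhile]
    · simp [pvSentinelLoop, h, List.takeWhile, ih]
      omega

-- B's scan on ys ++ [last], characterised by membership in ys and the last element
theorem pvScan_concat (ys : List Int) (last t : Int) (i : Int) :
    pvScan (ys ++ [last]) t i =
      if t ∈ ys then i + ((ys.takeWhile (fun x => x ≠ t)).length : Int)
      else if last = t then i + (ys.length : Int) else -1 := by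
  induction ys generalizing i with
  | nil => simp [pvScan]
  | cons x xs ih =>
    by_cases h : x = t
    · simp [pvScan, h, List.takeWhile]
    · have hx : ¬ t = x := fun hh => h hh.symm
      simp [pvScan, h, List.takeWhile, ih, hx]
      split_ifs <;> push_cast <;> omega

theorem pvSet_concat (ys : List Int) (a t : Int) :
    (ys ++ [a]).set ys.length t = ys ++ [t] := by
  induction ys with
  | nil => simp
  | cons x xs ih => simp [ih]

theorem pvGetD_concat (ys : List Int) (a : Int) :
    (ys ++ [a]).getD ys.length 0 = a := by
  simp [List.getD]

theorem pvTakeWhile_length_lt {ys : List Int} {t : Int} (h : t ∈ ys) :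
    (ys.takeWhile (fun x => x ≠ t)).length < ys.length := by
  induction ys with
  | nil => cases h
  | cons x xs ih =>
    by_cases hx : x = t
    · simp [List.takeWhile, hx]
    · have : t ∈ xs := by cases h with | head => exact absurd rfl hx | tail _ h' => exact h'
      simp [List.takeWhile, hx]
      simpa using ih this

theorem pvTakeWhile_length_eq {ys : List Int} {t : Int} (h : t ∉ ys) :
    (ys.takeWhile (fun x => x ≠ t)).length = ys.length := by
  induction ys with
  | nil => rfl
  | cons x xs ih =>
    have hx : x ≠ t := fun hh => h (hh ▸ List.mem_cons_self ..)
    simp [List.takeWhile, hx]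
    simpa using ih (fun hm => h (List.mem_cons_of_mem _ hm))

-- ===== VERDICT (by name: the statement is the Claim_ definition above) =====
theorem fnSentinelLinearSearch_spec : Claim_equal_fnSentinelLinearSearch := by
  intro arrInput varTarget _
  unfold Spec_fnSentinelLinearSearch
  rcases List.eq_nil_or_concat arrInput with rfl | ⟨ys, last, rfl⟩
  · rfl
  · simp only [List.concat_eq_append, fnSentinelLinearSearch, fnSentinelLinearSearch_alt]
    have hlen : (ys ++ [last]).length = ys.length + 1 := by simp
    have hne : ((ys ++ [last]).length : Int) ≠ 0 := by simp [hlen]; omega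
    rw [if_neg (by exact_mod_cast hne)]
    have hset : (ys ++ [last]).set ((ys ++ [last]).length - 1) varTarget = ys ++ [varTarget] := by
      rw [hlen]; simp [pvSet_concat ys last varTarget]
    have hget : (ys ++ [last]).getD ((ys ++ [last]).length - 1) 0 = last := by
      rw [hlen]; simp [pvGetD_concat ys last]
    rw [hset, hget, pvSentinelLoop_concat, pvScan_concat]
    by_cases hm : varTarget ∈ ys
    · have hlt := pvTakeWhile_length_lt hm
      rw [if_pos hm, if_pos (by push_cast [hlen]; omega)]
    · have heq := pvTakeWhile_length_eq hm
      rw [if_neg hm, heq]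
      by_cases hl : last = varTarget
      · rw [if_pos hl, if_pos (Or.inr hl)]
      · rw [if_neg hl, if_neg]
        push_cast [hlen]
        intro hc
        rcases hc with hc | hc
        · omega
        · exact hl hc
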